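-- pv_equiv track=rewrite | github.com/Mobi21/Kora | tests/acceptance/_report.py | _has_user_pipeline_with_tasks
-- ===== SOURCE A (Python) =====
-- from typing import Any
--
-- def _has_user_pipeline_with_tasks(orch: dict[str, Any]) -> bool:
--     pipelines = orch.get("pipeline_instances") or []
--     tasks = orch.get("worker_tasks") or []
--     user_pipeline_ids = {
--         p.get("id")
--         for p in pipelines
--         if p.get("parent_session_id") and p.get("state") in {"running", "completed"}
--     }
--     return any(t.get("pipeline_instance_id") in user_pipeline_ids for t in tasks)
-- ===== SOURCE B (Python) =====
-- def _has_user_pipeline_with_tasks(orch):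
--     tasks = orch.get("worker_tasks") or []
--     referenced = {t.get("pipeline_instance_id") for t in tasks}
--     for p in (orch.get("pipeline_instances") or []):
--         if p.get("parent_session_id") and p.get("state") in ("running", "completed") \
--                 and p.get("id") in referenced:
--             return True
--     return False
-- ===== Notes on version B (the rewrite author's own statement) =====
-- stated objective: alternative
-- what changed: Inverted the indexing direction: instead of building the set of qualifying pipeline ids and scanning tasks, B builds the set of pipeline ids referenced by tasks and scans pipelines with an early-return loop.
import Mathlib
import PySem

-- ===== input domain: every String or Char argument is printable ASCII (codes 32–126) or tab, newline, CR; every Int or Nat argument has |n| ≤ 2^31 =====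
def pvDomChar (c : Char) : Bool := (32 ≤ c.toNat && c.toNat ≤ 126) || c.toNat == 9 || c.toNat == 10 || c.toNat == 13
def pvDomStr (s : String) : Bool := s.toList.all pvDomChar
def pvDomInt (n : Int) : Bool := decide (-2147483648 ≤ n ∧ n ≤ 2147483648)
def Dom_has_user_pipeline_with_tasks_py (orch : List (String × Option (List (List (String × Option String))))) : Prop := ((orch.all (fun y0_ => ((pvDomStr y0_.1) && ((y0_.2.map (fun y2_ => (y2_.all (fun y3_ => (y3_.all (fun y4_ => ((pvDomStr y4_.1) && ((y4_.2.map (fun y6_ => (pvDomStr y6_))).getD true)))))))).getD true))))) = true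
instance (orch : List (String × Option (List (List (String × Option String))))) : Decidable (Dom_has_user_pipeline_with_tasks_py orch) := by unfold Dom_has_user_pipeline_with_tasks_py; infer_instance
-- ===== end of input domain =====

-- B inverts the indexing direction: A precomputes the set of qualifying pipeline ids and scans tasks; B precomputes the set of pipeline ids referenced by tasks and scans pipelines with an early-return recursion (alternative decomposition, same return value).


-- ===== PORT A =====
-- d.get(k) on an inner dict (value type Option String, default None): first-match lookup, flattened
def pvGet (d : List (String × Option String)) (k : String) : Option String :=
  ((PySem.Dict.mk d).get? k).getD none

-- orch.get(k) or []  (None / missing / empty list all give [])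
def pvGetList (orch : List (String × Option (List (List (String × Option String))))) (k : String) :
    List (List (String × Option String)) :=
  (((PySem.Dict.mk orch).get? k).getD none).getD []

-- Python truthiness of an Optional[str]
def pvTruthy (o : Option String) : Bool :=
  match o with
  | none => false
  | some s => !(s == "")

-- p.get("state") in {"running", "completed"}
def pvStateOk (o : Option String) : Bool :=
  o == some "running" || o == some "completed"

def has_user_pipeline_with_tasks_py (orch : List (String × Option (List (List (String × Option String))))) : Bool :=
  let pipelines := pvGetList orch "pipeline_instances"
  let tasks := pvGetList orch "worker_tasks"
  let user_pipeline_ids : PySem.Set (Option String) :=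
    PySem.Set.ofList
      ((pipelines.filter (fun p => pvTruthy (pvGet p "parent_session_id") && pvStateOk (pvGet p "state"))).map
        (fun p => pvGet p "id"))
  tasks.any (fun t => user_pipeline_ids.contains (pvGet t "pipeline_instance_id"))

-- ===== PORT B =====
-- B's early-return for-loop over pipelines: first qualifying pipeline whose id is referenced ⇒ True
def pvScanPipelines (referenced : PySem.Set (Option String)) :
    List (List (String × Option String)) → Bool
  | [] => false
  | p :: rest =>
    if pvTruthy (pvGet p "parent_session_id") && pvStateOk (pvGet p "state") &&
        referenced.contains (pvGet p "id") then
      true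
    else
      pvScanPipelines referenced rest

def has_user_pipeline_with_tasks_py_alt (orch : List (String × Option (List (List (String × Option String))))) : Bool :=
  let referenced : PySem.Set (Option String) :=
    PySem.Set.ofList ((pvGetList orch "worker_tasks").map (fun t => pvGet t "pipeline_instance_id"))
  pvScanPipelines referenced (pvGetList orch "pipeline_instances")

-- ===== PRECONDITION & SPEC =====
def Spec_has_user_pipeline_with_tasks_py (orch : List (String × Option (List (List (String × Option String))))) (out : Bool) : Prop := out = has_user_pipeline_with_tasks_py_alt orch
instance (orch : List (String × Option (List (List (String × Option String))))) (out : Bool) : Decidable (Spec_has_user_pipeline_with_tasks_py orch out) := by unfold Spec_has_user_pipeline_with_tasks_py; infer_instance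

-- ===== CLAIM (what is proved, stated in full; the proofs are below) =====
def Claim_equal_has_user_pipeline_with_tasks_py : Prop := ∀ (orch : List (String × Option (List (List (String × Option String))))), Dom_has_user_pipeline_with_tasks_py orch → Spec_has_user_pipeline_with_tasks_py orch (has_user_pipeline_with_tasks_py orch)

-- ===== LEMMAS AND PROOFS =====
-- B's loop is the existential scan over pipelines
theorem pvScanPipelines_eq_any (referenced : PySem.Set (Option String))
    (ps : List (List (String × Option String))) :
    pvScanPipelines referenced ps =
      ps.any (fun p =>
        pvTruthy (pvGet p "parent_session_id") && pvStateOk (pvGet p "state") &&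
          referenced.contains (pvGet p "id")) := by
  induction ps with
  | nil => rfl
  | cons p rest ih =>
    rw [List.any_cons, ← ih]
    simp only [pvScanPipelines]
    split_ifs with h
    · rw [h, Bool.true_or]
    · rw [eq_false_of_ne_true h, Bool.false_or]

-- both programs decide the same existential: a qualifying pipeline and a task sharing its id
theorem pv_both_exists (pipelines tasks : List (List (String × Option String))) :
    (tasks.any (fun t =>
        (PySem.Set.ofList
            ((pipelines.filter (fun p => pvTruthy (pvGet p "parent_session_id") && pvStateOk (pvGet p "state"))).map
              (fun p => pvGet p "id"))).contains (pvGet t "pipeline_instance_id"))) =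
      pvScanPipelines (PySem.Set.ofList (tasks.map (fun t => pvGet t "pipeline_instance_id"))) pipelines := by
  rw [pvScanPipelines_eq_any, Bool.eq_iff_iff]
  simp [PySem.Set.contains, PySem.Set.mem_ofList, List.any_eq_true, List.mem_filter, List.mem_map]
  constructor
  · rintro ⟨t, ht, p, ⟨hp, hc1, hc2⟩, hid⟩
    exact ⟨p, hp, ⟨hc1, hc2⟩, t, ht, hid.symm⟩
  · rintro ⟨p, hp, ⟨hc1, hc2⟩, t, ht, hid⟩
    exact ⟨t, ht, p, ⟨hp, hc1, hc2⟩, hid.symm⟩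

-- ===== VERDICT (by name: the statement is the Claim_ definition above) =====
theorem has_user_pipeline_with_tasks_py_spec : Claim_equal_has_user_pipeline_with_tasks_py := by
  intro orch _
  unfold Spec_has_user_pipeline_with_tasks_py has_user_pipeline_with_tasks_py has_user_pipeline_with_tasks_py_alt
  exact pv_both_exists _ _
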